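-- pv_equiv track=rewrite | github.com/Lhtie/CEGML | tasks/utils.py | _class_body_from_sorted_chars
-- ===== SOURCE A (Python) =====
-- def _class_body_from_sorted_chars(chars):
--     # Build compact class body such as "A-Za-z0-9#"
--     runs = []
--     i = 0
--     while i < len(chars):
--         j = i
--         while j + 1 < len(chars) and ord(chars[j + 1]) == ord(chars[j]) + 1:
--             j += 1
--         runs.append((chars[i], chars[j]))
--         i = j + 1
--
--     body_parts = []
--     for lo, hi in runs:
--         run_len = ord(hi) - ord(lo) + 1
--         if run_len >= 3:
--             body_parts.append(f"{lo}-{hi}")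
--         else:
--             for code in range(ord(lo), ord(hi) + 1):
--                 body_parts.append(chr(code))
--     return "".join(body_parts)
-- ===== SOURCE B (Python) =====
-- def _class_body_from_sorted_chars(chars):
--     # Single fused pass: emit each maximal run as soon as it ends (no runs list).
--     def emit(lo, hi):
--         if ord(hi) - ord(lo) >= 2:
--             return f"{lo}-{hi}"
--         return "".join(chr(code) for code in range(ord(lo), ord(hi) + 1))
--
--     out = []
--     lo = prev = None
--     for c in chars:
--         if lo is None:
--             lo = prev = c
--         elif ord(c) == ord(prev) + 1:
--             prev = c
--         else:
--             out.append(emit(lo, prev))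
--             lo = prev = c
--     if lo is not None:
--         out.append(emit(lo, prev))
--     return "".join(out)
-- ===== Notes on version B (the rewrite author's own statement) =====
-- stated objective: simpler
-- what changed: Replaces A's two-phase index-based scan (nested while loops building an intermediate runs list, then a formatting pass) with a single fused fold over the characters that tracks only the current run (lo, prev) and emits each run's piece the moment the run breaks.
-- outside the precondition, e.g. on _class_body_from_sorted_chars(['ab']): A raises TypeError, B raises TypeError
import Mathlib
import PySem

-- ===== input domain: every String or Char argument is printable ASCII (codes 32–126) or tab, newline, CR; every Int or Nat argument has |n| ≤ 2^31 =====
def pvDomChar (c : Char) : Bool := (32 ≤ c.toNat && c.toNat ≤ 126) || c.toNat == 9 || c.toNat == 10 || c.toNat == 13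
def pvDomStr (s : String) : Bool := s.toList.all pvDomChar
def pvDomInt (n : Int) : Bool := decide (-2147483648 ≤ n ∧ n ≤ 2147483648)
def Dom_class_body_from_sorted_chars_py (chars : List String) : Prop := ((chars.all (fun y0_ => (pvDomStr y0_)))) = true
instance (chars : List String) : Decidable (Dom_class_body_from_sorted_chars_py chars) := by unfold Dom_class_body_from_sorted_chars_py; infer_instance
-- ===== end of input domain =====

-- B replaces A's two-phase scan (index while-loops building a runs list, then formatting)
-- with one fused fold emitting each run as it ends; objective: simpler. Equal return value on Pre_.

-- ===== PORT A =====
-- ord(s): exact for the length-1 strings admitted by Pre_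
def pvOrd (s : String) : Int := ((s.toList.headD ' ').toNat : Int)
-- chr(n): exact for 0 ≤ n < 0x110000 (all codes reached here are ords of admitted chars)
def pvChr (n : Int) : String := String.ofList [Char.ofNat n.toNat]

-- inner 'while j + 1 < len(chars) and ord(chars[j+1]) == ord(chars[j]) + 1: j += 1'
def pvScanJ (chars : List String) (j : Nat) : Nat :=
  if j + 1 < chars.length ∧ pvOrd (chars.getD (j+1) "") = pvOrd (chars.getD j "") + 1 then
    pvScanJ chars (j+1)
  else j
termination_by chars.length - j
decreasing_by omega

theorem pvScanJ_ge (chars : List String) (j : Nat) : j ≤ pvScanJ chars j := by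
  fun_induction pvScanJ chars j with
  | case1 j h ih => omega
  | case2 j h => omega

-- outer 'while i < len(chars)' building the runs list
def pvRunsLoop (chars : List String) (i : Nat) : List (String × String) :=
  if i < chars.length then
    let j := pvScanJ chars i
    (chars.getD i "", chars.getD j "") :: pvRunsLoop chars (j + 1)
  else []
termination_by chars.length - i
decreasing_by have := pvScanJ_ge chars i; omega

def class_body_from_sorted_chars_py (chars : List String) : String :=
  let runs := pvRunsLoop chars 0
  let body_parts := runs.foldl (fun acc (r : String × String) =>
    let run_len : Int := pvOrd r.2 - pvOrd r.1 + 1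
    if run_len ≥ 3 then acc ++ [r.1 ++ "-" ++ r.2]
    else acc ++ (PySem.List.pyRange (pvOrd r.1) (pvOrd r.2 + 1) 1).map pvChr) []
  String.join body_parts

-- ===== PORT B =====
def pvEmit (lo hi : String) : String :=
  if pvOrd hi - pvOrd lo ≥ 2 then lo ++ "-" ++ hi
  else String.join ((PySem.List.pyRange (pvOrd lo) (pvOrd hi + 1) 1).map pvChr)

def pvStepB (st : List String × Option (String × String)) (c : String) :
    List String × Option (String × String) :=
  match st.2 with
  | none => (st.1, some (c, c))
  | some (lo, prev) =>
    if pvOrd c = pvOrd prev + 1 then (st.1, some (lo, c))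
    else (st.1 ++ [pvEmit lo prev], some (c, c))

def class_body_from_sorted_chars_py_alt (chars : List String) : String :=
  let st := chars.foldl pvStepB ([], none)
  let out := match st.2 with
    | none => st.1
    | some (lo, prev) => st.1 ++ [pvEmit lo prev]
  String.join out

-- ===== PRECONDITION & SPEC =====
-- Pre_ excludes inputs containing a string whose length is not 1: Python's ord() raises TypeError there.
def Pre_class_body_from_sorted_chars_py (chars : List String) : Prop :=
  ∀ s ∈ chars, s.length = 1
instance (chars : List String) : Decidable (Pre_class_body_from_sorted_chars_py chars) := by
  unfold Pre_class_body_from_sorted_chars_py; infer_instance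
def pvWitness_class_body_from_sorted_chars_py : List String := ["a", "b", "c", "x"]

def Spec_class_body_from_sorted_chars_py (chars : List String) (out : String) : Prop := out = class_body_from_sorted_chars_py_alt chars
instance (chars : List String) (out : String) : Decidable (Spec_class_body_from_sorted_chars_py chars out) := by unfold Spec_class_body_from_sorted_chars_py; infer_instance

-- ===== CLAIM (what is proved, stated in full; the proofs are below) =====
def Claim_equal_class_body_from_sorted_chars_py : Prop := ∀ (chars : List String), Dom_class_body_from_sorted_chars_py chars → Pre_class_body_from_sorted_chars_py chars → Spec_class_body_from_sorted_chars_py chars (class_body_from_sorted_chars_py chars)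

-- ===== LEMMAS AND PROOFS =====

-- structural run decomposition shared by both proofs
def pvGo (lo prev : String) : List String → List (String × String)
  | [] => [(lo, prev)]
  | c :: rest =>
    if pvOrd c = pvOrd prev + 1 then pvGo lo c rest
    else (lo, prev) :: pvGo c c rest

def pvRunsL : List String → List (String × String)
  | [] => []
  | c :: rest => pvGo c c rest

-- length of the extension of the current run
def pvExt (prev : String) : List String → Nat
  | [] => 0
  | c :: rest => if pvOrd c = pvOrd prev + 1 then pvExt c rest + 1 else 0

theorem pvGo_eq (lo prev : String) (l : List String) :
    pvGo lo prev l =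
      (lo, (prev :: l).getD (pvExt prev l) "") :: pvRunsL (l.drop (pvExt prev l)) := by
  induction l generalizing lo prev with
  | nil => simp [pvGo, pvExt, pvRunsL]
  | cons c rest ih =>
    by_cases h : pvOrd c = pvOrd prev + 1
    · simp [pvGo, pvExt, h, ih lo c]
    · simp [pvGo, pvExt, h, pvRunsL]

theorem pvScanJ_eq (chars : List String) (j : Nat) (hj : j < chars.length) :
    pvScanJ chars j = j + pvExt (chars.getD j "") (chars.drop (j+1)) := by
  fun_induction pvScanJ chars j with
  | case1 j h ih =>
    obtain ⟨hlt, hord⟩ := h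
    have hdrop : chars.drop (j+1) = chars.getD (j+1) "" :: chars.drop (j+2) := by
      rw [List.getD_eq_getElem _ _ hlt, ← List.getElem_cons_drop]
    rw [ih hlt, hdrop, pvExt, if_pos hord]
    simp only [show j + 1 + 1 = j + 2 from rfl]
    omega
  | case2 j h =>
    rcases Nat.lt_or_ge (j+1) chars.length with hlt | hge
    · have hdrop : chars.drop (j+1) = chars.getD (j+1) "" :: chars.drop (j+2) := by
        rw [List.getD_eq_getElem _ _ hlt, ← List.getElem_cons_drop]
      have hord : ¬ pvOrd (chars.getD (j+1) "") = pvOrd (chars.getD j "") + 1 := by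
        intro hc; exact h ⟨hlt, hc⟩
      rw [hdrop, pvExt, if_neg hord]
      omega
    · rw [List.drop_eq_nil_of_le hge, pvExt]
      omega

theorem pvConsDropGetD (chars : List String) (i k : Nat) (_h : i < chars.length) :
    (chars.getD i "" :: chars.drop (i+1)).getD k "" = chars.getD (i+k) "" := by
  cases k with
  | zero => simp
  | succ k =>
    rw [List.getD_cons_succ, List.getD_eq_getElem?_getD, List.getElem?_drop,
      List.getD_eq_getElem?_getD]
    congr 2
    omega

theorem pvRunsLoop_eq (chars : List String) (i : Nat) :
    pvRunsLoop chars i = pvRunsL (chars.drop i) := by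
  fun_induction pvRunsLoop chars i with
  | case1 i h j ih =>
    have hdropi : chars.drop i = chars.getD i "" :: chars.drop (i+1) := by
      rw [List.getD_eq_getElem _ _ h, ← List.getElem_cons_drop]
    have hj : j = i + pvExt (chars.getD i "") (chars.drop (i+1)) := pvScanJ_eq chars i h
    rw [hdropi,
      show pvRunsL (chars.getD i "" :: chars.drop (i+1))
          = pvGo (chars.getD i "") (chars.getD i "") (chars.drop (i+1)) from rfl,
      pvGo_eq, pvConsDropGetD chars i _ h, ih, hj, List.drop_drop]
    rw [show i + 1 + pvExt (chars.getD i "") (List.drop (i+1) chars)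
        = i + pvExt (chars.getD i "") (List.drop (i+1) chars) + 1 by omega]
  | case2 i h =>
    rw [List.drop_eq_nil_of_le (by omega)]
    rfl

-- per-run parts as produced by A
def pvPartsA (r : String × String) : List String :=
  if pvOrd r.2 - pvOrd r.1 + 1 ≥ 3 then [r.1 ++ "-" ++ r.2]
  else (PySem.List.pyRange (pvOrd r.1) (pvOrd r.2 + 1) 1).map pvChr

theorem pvEmit_eq_join (r : String × String) : pvEmit r.1 r.2 = String.join (pvPartsA r) := by
  unfold pvEmit pvPartsA
  by_cases h : pvOrd r.2 - pvOrd r.1 ≥ 2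
  · rw [if_pos h, if_pos (by omega)]
    simp [String.join]
  · rw [if_neg h, if_neg (by omega)]

theorem pvJoinFoldl (b : List String) (s : String) :
    b.foldl (· ++ ·) s = s ++ String.join b := by
  induction b generalizing s with
  | nil => simp [String.join]
  | cons x xs ih =>
    rw [List.foldl_cons, ih, show String.join (x :: xs) = xs.foldl (· ++ ·) ("" ++ x) from rfl,
      ih, String.append_assoc]
    simp

theorem pvJoinAppend (a b : List String) :
    String.join (a ++ b) = String.join a ++ String.join b := by
  rw [show String.join (a ++ b) = (a ++ b).foldl (· ++ ·) "" from rfl, List.foldl_append,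
    pvJoinFoldl, show a.foldl (· ++ ·) "" = String.join a from rfl]

theorem pvFoldA_eq (runs : List (String × String)) (acc : List String) :
    runs.foldl (fun acc (r : String × String) =>
      if pvOrd r.2 - pvOrd r.1 + 1 ≥ 3 then acc ++ [r.1 ++ "-" ++ r.2]
      else acc ++ (PySem.List.pyRange (pvOrd r.1) (pvOrd r.2 + 1) 1).map pvChr) acc
    = acc ++ runs.flatMap pvPartsA := by
  induction runs generalizing acc with
  | nil => simp
  | cons r rest ih =>
    simp only [List.foldl_cons, List.flatMap_cons, ih]
    unfold pvPartsA
    by_cases h : pvOrd r.2 - pvOrd r.1 + 1 ≥ 3 <;> simp [h]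

theorem pvJoin_flatMap (runs : List (String × String)) :
    String.join (runs.flatMap pvPartsA) = String.join (runs.map (fun r => pvEmit r.1 r.2)) := by
  induction runs with
  | nil => rfl
  | cons r rest ih =>
    rw [List.flatMap_cons, pvJoinAppend, ih, List.map_cons, pvEmit_eq_join r,
      show String.join (String.join (pvPartsA r) :: rest.map (fun r => pvEmit r.1 r.2))
        = (rest.map (fun r => pvEmit r.1 r.2)).foldl (· ++ ·) ("" ++ String.join (pvPartsA r)) from rfl,
      pvJoinFoldl]
    simp

theorem pvA_eq (chars : List String) :
    class_body_from_sorted_chars_py chars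
      = String.join ((pvRunsL chars).map (fun r => pvEmit r.1 r.2)) := by
  unfold class_body_from_sorted_chars_py
  dsimp only
  rw [pvFoldA_eq, pvRunsLoop_eq, List.nil_append, List.drop_zero, pvJoin_flatMap]

def pvFlush (st : List String × Option (String × String)) : List String :=
  match st.2 with
  | none => st.1
  | some (lo, prev) => st.1 ++ [pvEmit lo prev]

theorem pvFoldB_eq (l : List String) (acc : List String) (lo prev : String) :
    pvFlush (l.foldl pvStepB (acc, some (lo, prev)))
    = acc ++ (pvGo lo prev l).map (fun r => pvEmit r.1 r.2) := by
  induction l generalizing acc lo prev with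
  | nil => simp [pvFlush, pvGo]
  | cons c rest ih =>
    simp only [List.foldl_cons]
    by_cases h : pvOrd c = pvOrd prev + 1
    · rw [show pvStepB (acc, some (lo, prev)) c = (acc, some (lo, c)) by simp [pvStepB, h]]
      rw [ih]
      simp [pvGo, h]
    · rw [show pvStepB (acc, some (lo, prev)) c = (acc ++ [pvEmit lo prev], some (c, c)) by
        simp [pvStepB, h]]
      rw [ih]
      simp [pvGo, h]

theorem pvB_eq (chars : List String) :
    class_body_from_sorted_chars_py_alt chars
      = String.join ((pvRunsL chars).map (fun r => pvEmit r.1 r.2)) := by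
  cases chars with
  | nil => rfl
  | cons c rest =>
    unfold class_body_from_sorted_chars_py_alt
    dsimp only
    rw [List.foldl_cons, show pvStepB ([], none) c = ([], some (c, c)) from rfl]
    rw [show (match ((rest.foldl pvStepB ([], some (c, c))) : List String × Option (String × String)).2 with
        | none => (rest.foldl pvStepB ([], some (c, c))).1
        | some (lo, prev) => (rest.foldl pvStepB ([], some (c, c))).1 ++ [pvEmit lo prev])
        = pvFlush (rest.foldl pvStepB ([], some (c, c))) from rfl]
    rw [pvFoldB_eq rest [] c c, List.nil_append]
    rfl

-- ===== VERDICT (by name: the statement is the Claim_ definition above) =====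
theorem class_body_from_sorted_chars_py_spec : Claim_equal_class_body_from_sorted_chars_py := by
  intro chars _ _
  unfold Spec_class_body_from_sorted_chars_py
  rw [pvA_eq, pvB_eq]
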